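-- pv_equiv track=rewrite | github.com/pari0130/ALGORITHM | PYTHON/C.프로그래머스/48) 미로탈출/AA.py | solution
-- ===== SOURCE A (Python) =====
-- def solution(maps):
--     rows = len(maps)
--     cols = len(maps[0])
--
--     # Find starting point, lever location, and exit location
--     start_row, start_col = None, None
--     lever_row, lever_col = None, None
--     exit_row, exit_col = None, None
--     for r in range(rows):
--         for c in range(cols):
--             if maps[r][c] == 'S':
--                 start_row, start_col = r, c
--             elif maps[r][c] == 'L':
--                 lever_row, lever_col = r, c
--             elif maps[r][c] == 'E':
--                 exit_row, exit_col = r, c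
--
--     # Check if lever and exit are reachable
--     if (lever_row is None or exit_row is None or
--             not is_reachable(start_row, start_col, lever_row, lever_col, maps) or
--             not is_reachable(lever_row, lever_col, exit_row, exit_col, maps)):
--         return -1
--
--     # Calculate minimum time
--     time_to_lever = bfs(start_row, start_col, lever_row, lever_col, maps)
--     time_to_exit = bfs(lever_row, lever_col, exit_row, exit_col, maps)
--     return time_to_lever + time_to_exit
--
-- def is_reachable(start_row, start_col, target_row, target_col, maps):
--     rows = len(maps)
--     cols = len(maps[0])
--     visited = [[False] * cols for _ in range(rows)]
--     queue = [(start_row, start_col)]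
--     visited[start_row][start_col] = True
--     while queue:
--         row, col = queue.pop(0)
--         if row == target_row and col == target_col:
--             return True
--         for dr, dc in [(1, 0), (-1, 0), (0, 1), (0, -1)]:
--             r, c = row + dr, col + dc
--             if (0 <= r < rows and 0 <= c < cols and not visited[r][c] and
--                     maps[r][c] != 'X'):
--                 visited[r][c] = True
--                 queue.append((r, c))
--     return False
--
-- def bfs(start_row, start_col, target_row, target_col, maps):
--     rows = len(maps)
--     cols = len(maps[0])
--     visited = [[False] * cols for _ in range(rows)]
--     queue = [(start_row, start_col, 0)]
--     visited[start_row][start_col] = True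
--     while queue:
--         row, col, time = queue.pop(0)
--         if row == target_row and col == target_col:
--             return time
--         for dr, dc in [(1, 0), (-1, 0), (0, 1), (0, -1)]:
--             r, c = row + dr, col + dc
--             if (0 <= r < rows and 0 <= c < cols and not visited[r][c] and
--                     maps[r][c] != 'X'):
--                 visited[r][c] = True
--                 queue.append((r, c, time + 1))
--     return -1
-- ===== SOURCE B (Python) =====
-- # B: set-based layered BFS (a frontier list + a 'seen' set of cells), run once per leg
-- # and returning the distance or -1 directly, so A's two redundant is_reachable passes
-- # and its O(n) pop(0) queue disappear; S/L/E positions are collected in a dict.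
-- def solution(maps):
--     rows = len(maps)
--     cols = len(maps[0])
--     pos = {}
--     for r, rowstr in enumerate(maps):
--         for c, ch in enumerate(rowstr[:cols]):
--             if ch in 'SLE':
--                 pos[ch] = (r, c)
--     if 'L' not in pos or 'E' not in pos:
--         return -1
--     start, lever, exit_ = pos['S'], pos['L'], pos['E']
--     d1 = _leg(maps, rows, cols, start, lever)
--     if d1 < 0:
--         return -1
--     d2 = _leg(maps, rows, cols, lever, exit_)
--     if d2 < 0:
--         return d2
--     return d1 + d2
--
-- def _leg(maps, rows, cols, src, dst):
--     seen = {src}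
--     frontier = [src]
--     t = 0
--     while frontier:
--         if dst in frontier:
--             return t
--         nxt = []
--         for (row, col) in frontier:
--             for q in ((row + 1, col), (row - 1, col), (row, col + 1), (row, col - 1)):
--                 if 0 <= q[0] < rows and 0 <= q[1] < cols and q not in seen and maps[q[0]][q[1]] != 'X':
--                     seen.add(q)
--                     nxt.append(q)
--         frontier = nxt
--         t += 1
--     return -1
-- ===== Notes on version B (the rewrite author's own statement) =====
-- stated objective: faster
-- what changed: B replaces A's four list-pop(0) BFS passes (two is_reachable pre-checks plus two timed bfs runs) and its visited boolean matrix by a single set-based layered BFS (frontier list + seen set of cell tuples) that returns the distance or -1 directly, run once per leg, with the S/L/E positions collected in a dict during one enumerate scan.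
import Mathlib
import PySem

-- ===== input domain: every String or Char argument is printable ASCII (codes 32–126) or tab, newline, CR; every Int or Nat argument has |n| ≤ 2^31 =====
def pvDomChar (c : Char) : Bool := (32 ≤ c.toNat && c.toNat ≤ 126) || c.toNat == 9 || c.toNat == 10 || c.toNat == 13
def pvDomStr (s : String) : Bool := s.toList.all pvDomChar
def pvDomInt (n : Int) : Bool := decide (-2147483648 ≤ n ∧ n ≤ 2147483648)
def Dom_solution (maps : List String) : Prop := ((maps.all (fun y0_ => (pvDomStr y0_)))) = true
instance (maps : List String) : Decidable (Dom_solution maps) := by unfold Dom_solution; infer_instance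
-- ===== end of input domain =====

-- B replaces A's four list-pop(0) BFS passes (two is_reachable pre-checks + two timed bfs runs)
-- and its visited boolean matrix by one set-based layered BFS (frontier list + seen set) that
-- returns the distance (or -1) directly, run once per leg, with the S/L/E positions collected
-- in a dict during one enumerate scan; the return values agree on Pre_solution (exactly the
-- inputs on which the Python A returns normally).

-- maps[r][c], total form (both programs only evaluate it at in-range indices)
def charAt (maps : List String) (r c : Int) : Char :=
  (PySem.List.pyGet? ((PySem.List.pyGet? maps r).getD "").toList c).getD ' '

-- generic measure lemma for the expansion folds of both ports: each append marks one
-- fresh cell visited (cited by name in the decreasing_by of every loop below)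
theorem foldl_step_measure {σ β γ : Type} (μ : σ → Nat)
    (step : (σ × List γ) → β → (σ × List γ))
    (h : ∀ st x, μ (step st x).1 + (step st x).2.length ≤ μ st.1 + st.2.length ∧
                 μ (step st x).1 ≤ μ st.1) :
    ∀ (l : List β) (st : σ × List γ),
      μ (l.foldl step st).1 + (l.foldl step st).2.length ≤ μ st.1 + st.2.length ∧
      μ (l.foldl step st).1 ≤ μ st.1 := by
  intro l
  induction l with
  | nil => intro st; exact ⟨le_refl _, le_refl _⟩
  | cons x t ih =>
    intro st
    have h1 := h st x
    have h2 := ih (step st x)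
    exact ⟨le_trans h2.1 h1.1, le_trans h2.2 h1.2⟩

-- ===== PORT A =====

-- A's visited matrix and its primitives
def vget (v : List (List Bool)) (r c : Int) : Bool :=
  (v.getD r.toNat []).getD c.toNat true

def vset (v : List (List Bool)) (r c : Int) : List (List Bool) :=
  v.modify r.toNat (fun row => row.set c.toNat true)

-- [[False] * cols for _ in range(rows)]
def initV (rows cols : Int) : List (List Bool) :=
  List.replicate rows.toNat (List.replicate cols.toNat false)

-- number of False entries of the visited matrix (termination measure of A's loops)
def falseCount (v : List (List Bool)) : Nat :=
  (v.map (fun row => row.count false)).sum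

theorem row_set_count (row : List Bool) : ∀ (j : Nat), row.getD j true = false →
    (row.set j true).count false + 1 = row.count false := by
  induction row with
  | nil => intro j h; simp at h
  | cons b t ih =>
    intro j h
    cases j with
    | zero => simp at h; subst h; simp
    | succ j =>
      simp only [List.getD, List.getElem?_cons_succ] at h
      simp only [List.set_cons_succ, List.count_cons]
      have := ih j h
      omega

theorem vset_falseCount (v : List (List Bool)) (r c : Int) (h : vget v r c = false) :
    falseCount (vset v r c) + 1 = falseCount v := by
  unfold vget at h
  unfold vset falseCount
  generalize r.toNat = i at h ⊢
  induction v generalizing i with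
  | nil => simp [List.getD] at h
  | cons row t ih =>
    cases i with
    | zero =>
      simp only [List.getD, List.getElem?_cons_zero, Option.getD_some] at h
      have hr := row_set_count row c.toNat h
      simp [List.modify]
      omega
    | succ n =>
      simp only [List.getD, List.getElem?_cons_succ] at h
      have ht := ih n h
      simp [List.modify] at ht ⊢
      omega

def dirs : List (Int × Int) := [(1, 0), (-1, 0), (0, 1), (0, -1)]

-- body of the direction loop of is_reachable
def stepReach (maps : List String) (rows cols row col : Int)
    (st : List (List Bool) × List (Int × Int)) (d : Int × Int) :
    List (List Bool) × List (Int × Int) :=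
  -- r := row + d.1, c := col + d.2, inlined
  if 0 ≤ row + d.1 ∧ row + d.1 < rows ∧ 0 ≤ col + d.2 ∧ col + d.2 < cols ∧
      vget st.1 (row + d.1) (col + d.2) = false ∧ charAt maps (row + d.1) (col + d.2) ≠ 'X' then
    (vset st.1 (row + d.1) (col + d.2), st.2 ++ [(row + d.1, col + d.2)])
  else st

theorem stepReach_measure (maps : List String) (rows cols row col : Int) :
    ∀ st d, falseCount ((stepReach maps rows cols row col st d).1) +
        ((stepReach maps rows cols row col st d).2).length ≤ falseCount st.1 + st.2.length ∧
      falseCount ((stepReach maps rows cols row col st d).1) ≤ falseCount st.1 := by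
  intro st d
  unfold stepReach
  split
  · rename_i hg
    have := vset_falseCount st.1 (row + d.1) (col + d.2) hg.2.2.2.2.1
    simp only [List.length_append, List.length_cons, List.length_nil]
    omega
  · exact ⟨le_refl _, le_refl _⟩

-- body of the direction loop of bfs
def stepBfs (maps : List String) (rows cols row col time : Int)
    (st : List (List Bool) × List (Int × Int × Int)) (d : Int × Int) :
    List (List Bool) × List (Int × Int × Int) :=
  -- r := row + d.1, c := col + d.2, inlined
  if 0 ≤ row + d.1 ∧ row + d.1 < rows ∧ 0 ≤ col + d.2 ∧ col + d.2 < cols ∧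
      vget st.1 (row + d.1) (col + d.2) = false ∧ charAt maps (row + d.1) (col + d.2) ≠ 'X' then
    (vset st.1 (row + d.1) (col + d.2), st.2 ++ [(row + d.1, col + d.2, time + 1)])
  else st

theorem stepBfs_measure (maps : List String) (rows cols row col time : Int) :
    ∀ st d, falseCount ((stepBfs maps rows cols row col time st d).1) +
        ((stepBfs maps rows cols row col time st d).2).length ≤ falseCount st.1 + st.2.length ∧
      falseCount ((stepBfs maps rows cols row col time st d).1) ≤ falseCount st.1 := by
  intro st d
  unfold stepBfs
  split
  · rename_i hg
    have := vset_falseCount st.1 (row + d.1) (col + d.2) hg.2.2.2.2.1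
    simp only [List.length_append, List.length_cons, List.length_nil]
    omega
  · exact ⟨le_refl _, le_refl _⟩

-- while queue of is_reachable
def reachLoop (maps : List String) (rows cols tr tc : Int) :
    List (Int × Int) → List (List Bool) → Bool
  | [], _ => false
  | (row, col) :: rest, v =>
    if row = tr ∧ col = tc then true
    else
      reachLoop maps rows cols tr tc
        (dirs.foldl (stepReach maps rows cols row col) (v, rest)).2
        (dirs.foldl (stepReach maps rows cols row col) (v, rest)).1
termination_by q v => falseCount v + q.length
decreasing_by
  have h := foldl_step_measure falseCount (stepReach maps rows cols row col)
    (stepReach_measure maps rows cols row col) dirs (v, rest)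
  dsimp only at h
  simp only [List.length_cons]
  omega

-- while queue of bfs
def bfsLoop (maps : List String) (rows cols tr tc : Int) :
    List (Int × Int × Int) → List (List Bool) → Int
  | [], _ => -1
  | (row, col, time) :: rest, v =>
    if row = tr ∧ col = tc then time
    else
      bfsLoop maps rows cols tr tc
        (dirs.foldl (stepBfs maps rows cols row col time) (v, rest)).2
        (dirs.foldl (stepBfs maps rows cols row col time) (v, rest)).1
termination_by q v => falseCount v + q.length
decreasing_by
  have h := foldl_step_measure falseCount (stepBfs maps rows cols row col time)
    (stepBfs_measure maps rows cols row col time) dirs (v, rest)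
  dsimp only at h
  simp only [List.length_cons]
  omega

def isReachableA (sr sc tr tc : Int) (maps : List String) : Bool :=
  let rows : Int := (maps.length : Int)
  let cols : Int := (((PySem.List.pyGet? maps 0).getD "").toList.length : Int)
  reachLoop maps rows cols tr tc [(sr, sc)] (vset (initV rows cols) sr sc)

def bfsA (sr sc tr tc : Int) (maps : List String) : Int :=
  let rows : Int := (maps.length : Int)
  let cols : Int := (((PySem.List.pyGet? maps 0).getD "").toList.length : Int)
  bfsLoop maps rows cols tr tc [(sr, sc, 0)] (vset (initV rows cols) sr sc)

-- the S/L/E scan (elif chain, last occurrence kept)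
def scanA (maps : List String) (rows cols : Int) :
    Option (Int × Int) × Option (Int × Int) × Option (Int × Int) :=
  (PySem.List.pyRange 0 rows 1).foldl (fun acc r =>
    (PySem.List.pyRange 0 cols 1).foldl (fun acc c =>
      if charAt maps r c = 'S' then (some (r, c), acc.2.1, acc.2.2)
      else if charAt maps r c = 'L' then (acc.1, some (r, c), acc.2.2)
      else if charAt maps r c = 'E' then (acc.1, acc.2.1, some (r, c))
      else acc) acc) (none, none, none)

def solution (maps : List String) : Int :=
  let rows : Int := (maps.length : Int)
  let cols : Int := (((PySem.List.pyGet? maps 0).getD "").toList.length : Int)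
  let sle := scanA maps rows cols
  match sle.2.1, sle.2.2 with
  | some lever, some exitp =>
    match sle.1 with
    | some start =>
      if ¬ (isReachableA start.1 start.2 lever.1 lever.2 maps = true) ∨
         ¬ (isReachableA lever.1 lever.2 exitp.1 exitp.2 maps = true) then -1
      else bfsA start.1 start.2 lever.1 lever.2 maps + bfsA lever.1 lever.2 exitp.1 exitp.2 maps
    | none => -1  -- Python raises TypeError here (start_row is None); excluded by Pre_solution
  | _, _ => -1

-- ===== PORT B =====

-- the four neighbour cells, in B's tuple order
def neighbors (p : Int × Int) : List (Int × Int) :=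
  [(p.1 + 1, p.2), (p.1 - 1, p.2), (p.1, p.2 + 1), (p.1, p.2 - 1)]

-- body of B's neighbour loop: bounds, not-yet-seen, not a wall
def tryVisit (maps : List String) (rows cols : Int)
    (st : PySem.Set (Int × Int) × List (Int × Int)) (q : Int × Int) :
    PySem.Set (Int × Int) × List (Int × Int) :=
  if 0 ≤ q.1 ∧ q.1 < rows ∧ 0 ≤ q.2 ∧ q.2 < cols ∧
      PySem.Set.contains st.1 q = false ∧ charAt maps q.1 q.2 ≠ 'X' then
    (PySem.Set.add st.1 q, st.2 ++ [q])
  else st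

-- inner 'for (row, col) in frontier' body of B's while loop
def expandS (maps : List String) (rows cols : Int)
    (st : PySem.Set (Int × Int) × List (Int × Int)) (cell : Int × Int) :
    PySem.Set (Int × Int) × List (Int × Int) :=
  (neighbors cell).foldl (tryVisit maps rows cols) st

-- the grid cells (termination measure of B's loop counts those not yet seen)
def allCells (rows cols : Int) : List (Int × Int) :=
  (PySem.List.pyRange 0 rows 1).flatMap
    (fun r => (PySem.List.pyRange 0 cols 1).map (fun c => (r, c)))

def countUnseen (rows cols : Int) (seen : PySem.Set (Int × Int)) : Nat :=
  (allCells rows cols).countP (fun p => !(PySem.Set.contains seen p))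

theorem mem_allCells (rows cols : Int) (p : Int × Int) :
    p ∈ allCells rows cols ↔ 0 ≤ p.1 ∧ p.1 < rows ∧ 0 ≤ p.2 ∧ p.2 < cols := by
  rcases p with ⟨r, c⟩
  simp only [allCells, List.mem_flatMap, List.mem_map, PySem.List.mem_pyRange_one,
    Prod.mk.injEq]
  constructor
  · rintro ⟨a, ha, b, hb, h1, h2⟩
    subst h1; subst h2
    exact ⟨ha.1, ha.2, hb.1, hb.2⟩
  · rintro ⟨h1, h2, h3, h4⟩
    exact ⟨r, ⟨h1, h2⟩, c, ⟨h3, h4⟩, rfl, rfl⟩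

theorem countP_lt_of_false {α : Type} (l : List α) (p q : α → Bool)
    (hle : ∀ x ∈ l, q x = true → p x = true) (a : α) (ha : a ∈ l)
    (hpa : p a = true) (hqa : q a = false) :
    l.countP q < l.countP p := by
  induction l with
  | nil => simp at ha
  | cons x t ih =>
    simp only [List.countP_cons]
    rcases List.mem_cons.mp ha with h | h
    · subst h
      have hle' : t.countP q ≤ t.countP p :=
        List.countP_mono_left (fun y hy => hle y (List.mem_cons_of_mem _ hy))
      simp only [hpa, hqa]
      simp
      omega
    · have hlt := ih (fun y hy => hle y (List.mem_cons_of_mem _ hy)) h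
      by_cases hq : q x = true
      · simp only [hq, hle x List.mem_cons_self hq]
        omega
      · rw [Bool.not_eq_true] at hq
        simp only [hq]
        by_cases hp : p x = true
        · simp only [hp]; simp; omega
        · rw [Bool.not_eq_true] at hp; simp only [hp]; simp; omega

theorem countUnseen_add_lt (rows cols : Int) (seen : PySem.Set (Int × Int)) (q : Int × Int)
    (hb : 0 ≤ q.1 ∧ q.1 < rows ∧ 0 ≤ q.2 ∧ q.2 < cols)
    (hns : PySem.Set.contains seen q = false) :
    countUnseen rows cols (PySem.Set.add seen q) < countUnseen rows cols seen := by
  unfold countUnseen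
  have hqm : q ∉ seen := fun hmem => by
    simp only [PySem.Set.contains_eq_listContains, List.contains_eq_mem, decide_eq_false_iff_not] at hns
    exact hns hmem
  have hadd : PySem.Set.add seen q = seen ++ [q] := by
    simp [PySem.Set.add, hqm]
  rw [hadd]
  refine countP_lt_of_false _ _ _ ?_ q ((mem_allCells rows cols q).mpr hb) ?_ ?_
  · intro x _ hx
    simp only [Bool.not_eq_true', PySem.Set.contains_eq_listContains,
      List.contains_append, Bool.or_eq_false_iff] at hx ⊢
    exact hx.1
  · simp only [Bool.not_eq_true', PySem.Set.contains_eq_listContains] at hns ⊢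
    exact hns
  · simp

theorem tryVisit_measure (maps : List String) (rows cols : Int) :
    ∀ st q, countUnseen rows cols ((tryVisit maps rows cols st q).1) +
        ((tryVisit maps rows cols st q).2).length ≤ countUnseen rows cols st.1 + st.2.length ∧
      countUnseen rows cols ((tryVisit maps rows cols st q).1) ≤ countUnseen rows cols st.1 := by
  intro st q
  unfold tryVisit
  split
  · rename_i hg
    have := countUnseen_add_lt rows cols st.1 q ⟨hg.1, hg.2.1, hg.2.2.1, hg.2.2.2.1⟩
      hg.2.2.2.2.1
    simp only [List.length_append, List.length_cons, List.length_nil]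
    omega
  · exact ⟨le_refl _, le_refl _⟩

theorem expandS_measure (maps : List String) (rows cols : Int) :
    ∀ st cell, countUnseen rows cols ((expandS maps rows cols st cell).1) +
        ((expandS maps rows cols st cell).2).length ≤ countUnseen rows cols st.1 + st.2.length ∧
      countUnseen rows cols ((expandS maps rows cols st cell).1) ≤ countUnseen rows cols st.1 := by
  intro st cell
  unfold expandS
  exact foldl_step_measure (countUnseen rows cols) (tryVisit maps rows cols)
    (tryVisit_measure maps rows cols) _ st

-- while frontier of _leg: one whole layer per round
def legLoop (maps : List String) (rows cols : Int) (dst : Int × Int)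
    (seen : PySem.Set (Int × Int)) (frontier : List (Int × Int)) (t : Int) : Int :=
  if h : frontier = [] then -1
  else if dst ∈ frontier then t
  else
    legLoop maps rows cols dst
      (frontier.foldl (expandS maps rows cols) (seen, [])).1
      (frontier.foldl (expandS maps rows cols) (seen, [])).2 (t + 1)
termination_by 2 * countUnseen rows cols seen + (if frontier = [] then 0 else 1)
decreasing_by
  have h2 := foldl_step_measure (countUnseen rows cols) (expandS maps rows cols)
    (expandS_measure maps rows cols) frontier (seen, [])
  dsimp only at h2
  simp only [List.length_nil, Nat.add_zero] at h2
  simp only [List.foldl_attach, if_neg h]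
  split
  · omega
  · rename_i hne
    have hpos := List.length_pos_iff.mpr hne
    omega

def legB (maps : List String) (rows cols : Int) (src dst : Int × Int) : Int :=
  legLoop maps rows cols dst (PySem.Set.ofList [src]) [src] 0

-- the position dict, filled by the enumerate scan over the rows (first cols chars of each)
def scanB (maps : List String) (cols : Int) : PySem.Dict Char (Int × Int) :=
  (PySem.List.enumerate maps).foldl (fun d rp =>
    (PySem.List.enumerate (PySem.List.slice rp.2.toList none (some cols))).foldl (fun d cp =>
      if cp.2 = 'S' ∨ cp.2 = 'L' ∨ cp.2 = 'E' then d.insert cp.2 (rp.1, cp.1) else d) d)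
    PySem.Dict.empty

def solution_alt (maps : List String) : Int :=
  let rows : Int := (maps.length : Int)
  let cols : Int := (((PySem.List.pyGet? maps 0).getD "").toList.length : Int)
  let pos := scanB maps cols
  if pos.contains 'L' = false ∨ pos.contains 'E' = false then -1
  else
    match pos.get? 'S' with
    | none => -1  -- Python raises KeyError here; excluded by Pre_solution
    | some start =>
      let lever := (pos.get? 'L').getD (0, 0)
      let exitp := (pos.get? 'E').getD (0, 0)
      let d1 := legB maps rows cols start lever
      if d1 < 0 then -1
      else
        let d2 := legB maps rows cols lever exitp
        if d2 < 0 then d2 else d1 + d2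

-- ===== PRECONDITION & SPEC =====

-- does the scanned rows × cols region contain the character ch?
def hasCh (maps : List String) (ch : Char) : Bool :=
  (PySem.List.pyRange 0 (maps.length : Int) 1).any fun r =>
    (PySem.List.pyRange 0 (((maps.headD "").toList.length : Int)) 1).any fun c =>
      charAt maps r c = ch

-- exactly the inputs on which the Python A returns normally: a nonempty map, every row at least
-- as long as row 0 (else the scan raises IndexError), and an 'S' whenever both 'L' and 'E'
-- are present (else is_reachable is called with None and raises TypeError).
def Pre_solution (maps : List String) : Prop :=
  maps ≠ [] ∧
  (∀ s ∈ maps, (maps.headD "").toList.length ≤ s.toList.length) ∧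
  (hasCh maps 'L' = true → hasCh maps 'E' = true → hasCh maps 'S' = true)

instance (maps : List String) : Decidable (Pre_solution maps) := by
  unfold Pre_solution; infer_instance

def pvWitness_solution : List String := ["S.L", "X.E"]

def Spec_solution (maps : List String) (out : Int) : Prop := out = solution_alt maps
instance (maps : List String) (out : Int) : Decidable (Spec_solution maps out) := by
  unfold Spec_solution; infer_instance

-- ===== CLAIM (what is proved, stated in full; the proofs are below) =====
def Claim_equal_solution : Prop :=
  ∀ (maps : List String), Dom_solution maps → Pre_solution maps →
    Spec_solution maps (solution maps)

-- ===== LEMMAS AND PROOFS =====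

-- tag a frontier with a time / forget the time component
def tagT (t : Int) (xs : List (Int × Int)) : List (Int × Int × Int) :=
  xs.map (fun p => (p.1, p.2, t))

def dropT (q : List (Int × Int × Int)) : List (Int × Int) :=
  q.map (fun x => (x.1, x.2.1))

-- proof-side layered BFS over A's visited MATRIX: the bridge between A's single
-- timed queue and B's set-based layers
def stepB (maps : List String) (rows cols : Int)
    (st : List (List Bool) × List (Int × Int)) (p : Int × Int) :
    List (List Bool) × List (Int × Int) :=
  if 0 ≤ p.1 ∧ p.1 < rows ∧ 0 ≤ p.2 ∧ p.2 < cols ∧ vget st.1 p.1 p.2 = false ∧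
      charAt maps p.1 p.2 ≠ 'X' then
    (vset st.1 p.1 p.2, st.2 ++ [p])
  else st

theorem stepB_measure (maps : List String) (rows cols : Int) :
    ∀ st p, falseCount ((stepB maps rows cols st p).1) + ((stepB maps rows cols st p).2).length ≤
        falseCount st.1 + st.2.length ∧
      falseCount ((stepB maps rows cols st p).1) ≤ falseCount st.1 := by
  intro st p
  unfold stepB
  split
  · rename_i hg
    have := vset_falseCount st.1 p.1 p.2 hg.2.2.2.2.1
    simp only [List.length_append, List.length_cons, List.length_nil]
    omega
  · exact ⟨le_refl _, le_refl _⟩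

def expandCell (maps : List String) (rows cols : Int)
    (st : List (List Bool) × List (Int × Int)) (cell : Int × Int) :
    List (List Bool) × List (Int × Int) :=
  stepB maps rows cols
    (stepB maps rows cols
      (stepB maps rows cols
        (stepB maps rows cols st (cell.1 + 1, cell.2))
        (cell.1 - 1, cell.2))
      (cell.1, cell.2 + 1))
    (cell.1, cell.2 - 1)

theorem expandCell_eq_foldl (maps : List String) (rows cols : Int)
    (st : List (List Bool) × List (Int × Int)) (cell : Int × Int) :
    expandCell maps rows cols st cell
      = (neighbors cell).foldl (stepB maps rows cols) st := rfl

theorem expandCell_measure (maps : List String) (rows cols : Int) :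
    ∀ st cell, falseCount ((expandCell maps rows cols st cell).1) +
        ((expandCell maps rows cols st cell).2).length ≤ falseCount st.1 + st.2.length ∧
      falseCount ((expandCell maps rows cols st cell).1) ≤ falseCount st.1 := by
  intro st cell
  rw [expandCell_eq_foldl]
  exact foldl_step_measure falseCount (stepB maps rows cols) (stepB_measure maps rows cols) _ st

def bfsLoopB (maps : List String) (rows cols : Int) (target : Int × Int)
    (v : List (List Bool)) (frontier : List (Int × Int)) (t : Int) : Int :=
  if h : frontier = [] then -1
  else if target ∈ frontier then t
  else
    bfsLoopB maps rows cols target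
      (frontier.foldl (expandCell maps rows cols) (v, [])).1
      (frontier.foldl (expandCell maps rows cols) (v, [])).2 (t + 1)
termination_by 2 * falseCount v + (if frontier = [] then 0 else 1)
decreasing_by
  have h2 := foldl_step_measure falseCount (expandCell maps rows cols)
    (expandCell_measure maps rows cols) frontier (v, [])
  dsimp only at h2
  simp only [List.length_nil, Nat.add_zero] at h2
  simp only [List.foldl_attach, if_neg h]
  split
  · omega
  · rename_i hne
    have hpos := List.length_pos_iff.mpr hne
    omega

theorem bfsLoopB_nil (maps : List String) (rows cols : Int) (target : Int × Int)
    (v : List (List Bool)) (t : Int) : bfsLoopB maps rows cols target v [] t = -1 := by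
  rw [bfsLoopB]; simp

theorem bfsLoopB_cons (maps : List String) (rows cols : Int) (target : Int × Int)
    (v : List (List Bool)) (x : Int × Int) (f : List (Int × Int)) (t : Int) :
    bfsLoopB maps rows cols target v (x :: f) t
      = if target ∈ x :: f then t
        else bfsLoopB maps rows cols target
          ((x :: f).foldl (expandCell maps rows cols) (v, [])).1
          ((x :: f).foldl (expandCell maps rows cols) (v, [])).2 (t + 1) := by
  rw [bfsLoopB]; simp

-- a step of the matrix-layer fold only appends to the accumulator
theorem foldl_accP {α : Type}
    (f : (List (List Bool) × List (Int × Int)) → α → (List (List Bool) × List (Int × Int)))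
    (hP : ∀ v acc x, f (v, acc) x = ((f (v, []) x).1, acc ++ (f (v, []) x).2)) :
    ∀ (l : List α) (v : List (List Bool)) (acc : List (Int × Int)),
      l.foldl f (v, acc) = ((l.foldl f (v, [])).1, acc ++ (l.foldl f (v, [])).2) := by
  intro l
  induction l with
  | nil => intro v acc; simp
  | cons x tl ih =>
    intro v acc
    simp only [List.foldl_cons]
    rw [hP v acc x]
    rcases hfx : f (v, []) x with ⟨v1, a1⟩
    dsimp only
    rw [ih v1 (acc ++ a1), ih v1 a1]
    simp [List.append_assoc]

theorem stepB_P (maps : List String) (rows cols : Int) :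
    ∀ (v : List (List Bool)) (acc : List (Int × Int)) (p : Int × Int),
      stepB maps rows cols (v, acc) p
        = ((stepB maps rows cols (v, []) p).1, acc ++ (stepB maps rows cols (v, []) p).2) := by
  intro v acc p
  unfold stepB
  dsimp only
  split <;> simp

theorem expandCell_P (maps : List String) (rows cols : Int) :
    ∀ (v : List (List Bool)) (acc : List (Int × Int)) (cell : Int × Int),
      expandCell maps rows cols (v, acc) cell
        = ((expandCell maps rows cols (v, []) cell).1,
           acc ++ (expandCell maps rows cols (v, []) cell).2) := by
  intro v acc cell
  rw [expandCell_eq_foldl, expandCell_eq_foldl]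
  exact foldl_accP _ (stepB_P maps rows cols) _ v acc

theorem expandAll_acc (maps : List String) (rows cols : Int) :
    ∀ (cells : List (Int × Int)) (v : List (List Bool)) (acc : List (Int × Int)),
      cells.foldl (expandCell maps rows cols) (v, acc)
        = ((cells.foldl (expandCell maps rows cols) (v, [])).1,
           acc ++ (cells.foldl (expandCell maps rows cols) (v, [])).2) :=
  fun cells v acc => foldl_accP _ (expandCell_P maps rows cols) cells v acc

-- A's direction fold is the matrix-layer neighbour visit, with times tagged on
theorem bfsStep_tag (maps : List String) (rows cols row col time : Int) :
    ∀ (ds : List (Int × Int)) (v : List (List Bool)) (q : List (Int × Int × Int))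
      (acc : List (Int × Int)),
      ds.foldl (stepBfs maps rows cols row col time) (v, q ++ tagT (time + 1) acc)
        = (((ds.map (fun d => (row + d.1, col + d.2))).foldl (stepB maps rows cols) (v, acc)).1,
           q ++ tagT (time + 1)
             (((ds.map (fun d => (row + d.1, col + d.2))).foldl (stepB maps rows cols) (v, acc)).2)) := by
  intro ds
  induction ds with
  | nil => intro v q acc; simp
  | cons d tl ih =>
    intro v q acc
    simp only [List.map_cons, List.foldl_cons]
    unfold stepBfs stepB
    dsimp only
    split
    · have h2 := ih (vset v (row + d.1) (col + d.2)) q (acc ++ [(row + d.1, col + d.2)])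
      simp only [tagT, List.map_append, List.map_cons, List.map_nil] at h2 ⊢
      simpa [List.append_assoc] using h2
    · exact ih v q acc

theorem dirs_map_neighbors (row col : Int) :
    dirs.map (fun d => (row + d.1, col + d.2))
      = [(row + 1, col), (row - 1, col), (row, col + 1), (row, col - 1)] := by
  simp [dirs]
  constructor <;> omega

theorem bfsFold_expand (maps : List String) (rows cols row col time : Int)
    (v : List (List Bool)) (q : List (Int × Int × Int)) (acc : List (Int × Int)) :
    dirs.foldl (stepBfs maps rows cols row col time) (v, q ++ tagT (time + 1) acc)
      = ((expandCell maps rows cols (v, acc) (row, col)).1,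
         q ++ tagT (time + 1) ((expandCell maps rows cols (v, acc) (row, col)).2)) := by
  rw [bfsStep_tag, dirs_map_neighbors]
  rfl

-- A's is_reachable fold is A's bfs fold with the time forgotten
theorem reachStep_corr (maps : List String) (rows cols row col time : Int) :
    ∀ (ds : List (Int × Int)) (v : List (List Bool)) (q : List (Int × Int × Int)),
      ds.foldl (stepReach maps rows cols row col) (v, dropT q)
        = ((ds.foldl (stepBfs maps rows cols row col time) (v, q)).1,
           dropT ((ds.foldl (stepBfs maps rows cols row col time) (v, q)).2)) := by
  intro ds
  induction ds with
  | nil => intro v q; simp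
  | cons d tl ih =>
    intro v q
    simp only [List.foldl_cons]
    unfold stepReach stepBfs
    dsimp only
    split
    · have h2 := ih (vset v (row + d.1) (col + d.2)) (q ++ [(row + d.1, col + d.2, time + 1)])
      simpa [dropT] using h2
    · exact ih v q

-- every time in the queue stays nonnegative through the fold
theorem bfsFold_times (maps : List String) (rows cols row col time : Int) (htime : 0 ≤ time) :
    ∀ (ds : List (Int × Int)) (v : List (List Bool)) (q : List (Int × Int × Int)),
      (∀ x ∈ q, 0 ≤ x.2.2) →
      ∀ x ∈ (ds.foldl (stepBfs maps rows cols row col time) (v, q)).2, 0 ≤ x.2.2 := by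
  intro ds
  induction ds with
  | nil => intro v q hq; exact hq
  | cons d tl ih =>
    intro v q hq
    simp only [List.foldl_cons]
    unfold stepBfs
    dsimp only
    split
    · refine ih _ _ ?_
      intro x hx
      rcases List.mem_append.mp hx with h | h
      · exact hq x h
      · simp at h; subst h; simp; omega
    · exact ih v q hq

-- is_reachable returns True exactly when bfs would return a value ≠ -1
theorem reach_eq_bfs (maps : List String) (rows cols tr tc : Int) :
    ∀ (k : Nat) (q : List (Int × Int × Int)) (v : List (List Bool)),
      falseCount v + q.length ≤ k → (∀ x ∈ q, 0 ≤ x.2.2) →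
      reachLoop maps rows cols tr tc (dropT q) v
        = decide (bfsLoop maps rows cols tr tc q v ≠ -1) := by
  intro k
  induction k with
  | zero =>
    intro q v hm ht
    have hq : q = [] := by
      cases q with
      | nil => rfl
      | cons x t => simp [List.length_cons] at hm
    subst hq
    simp [dropT, reachLoop, bfsLoop]
  | succ k ih =>
    intro q v hm ht
    match q with
    | [] => simp [dropT, reachLoop, bfsLoop]
    | (row, col, time) :: rest =>
      have hdrop : dropT ((row, col, time) :: rest) = (row, col) :: dropT rest := rfl
      rw [hdrop]
      rw [reachLoop, bfsLoop]
      by_cases htgt : row = tr ∧ col = tc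
      · rw [if_pos htgt, if_pos htgt]
        have h0 : (0 : Int) ≤ time := by
          have := ht (row, col, time) (List.mem_cons_self)
          simpa using this
        simp
        omega
      · rw [if_neg htgt, if_neg htgt]
        rw [reachStep_corr maps rows cols row col time dirs v rest]
        have hmeas := foldl_step_measure falseCount (stepBfs maps rows cols row col time)
          (stepBfs_measure maps rows cols row col time) dirs (v, rest)
        dsimp only at hmeas
        refine ih _ _ ?_ ?_
        · simp only []
          simp only [List.length_cons] at hm
          omega
        · refine bfsFold_times maps rows cols row col time ?_ dirs v rest ?_
          · have := ht (row, col, time) (List.mem_cons_self)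
            simpa using this
          · intro x hx
            exact ht x (List.mem_cons_of_mem _ hx)

-- the matrix-layer loop returns -1 or a value ≥ the running time
theorem bfsLoopB_nonneg (maps : List String) (rows cols : Int) (target : Int × Int) :
    ∀ (k : Nat) (v : List (List Bool)) (f : List (Int × Int)) (t : Int),
      2 * falseCount v + (if f = [] then 0 else 1) ≤ k → 0 ≤ t →
      bfsLoopB maps rows cols target v f t = -1 ∨ 0 ≤ bfsLoopB maps rows cols target v f t := by
  intro k
  induction k with
  | zero =>
    intro v f t hm h0
    have hf : f = [] := by
      by_contra h
      simp [h] at hm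
    subst hf
    rw [bfsLoopB_nil]
    left; rfl
  | succ k ih =>
    intro v f t hm h0
    match f with
    | [] => rw [bfsLoopB_nil]; left; rfl
    | x :: f' =>
      rw [bfsLoopB_cons]
      by_cases htgt : target ∈ x :: f'
      · rw [if_pos htgt]; right; exact h0
      · rw [if_neg htgt]
        have hmeas := foldl_step_measure falseCount (expandCell maps rows cols)
          (expandCell_measure maps rows cols) (x :: f') (v, [])
        dsimp only at hmeas
        simp only [List.length_nil, Nat.add_zero] at hmeas
        have hm' : 2 * falseCount v ≤ k := by
          rw [if_neg (List.cons_ne_nil x f')] at hm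
          omega
        refine ih _ _ _ ?_ (by omega)
        by_cases hnil : ((x :: f').foldl (expandCell maps rows cols) (v, [])).2 = []
        · rw [if_pos hnil]
          omega
        · have hlen := List.length_pos_iff.mpr hnil
          rw [if_neg hnil]
          omega

-- CORE: A's single queue is the current layer (time t) followed by the next layer (time t+1)
theorem main_corr (maps : List String) (rows cols tr tc : Int) :
    ∀ (k : Nat) (v : List (List Bool)) (xs ys : List (Int × Int)) (t : Int),
      2 * (falseCount v + xs.length + ys.length) + (if xs = [] then 1 else 0) ≤ k →
      bfsLoop maps rows cols tr tc (tagT t xs ++ tagT (t + 1) ys) v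
        = if (tr, tc) ∈ xs then t
          else bfsLoopB maps rows cols (tr, tc)
            (xs.foldl (expandCell maps rows cols) (v, [])).1
            (ys ++ (xs.foldl (expandCell maps rows cols) (v, [])).2) (t + 1) := by
  intro k
  induction k with
  | zero =>
    intro v xs ys t hm
    exfalso
    by_cases h : xs = [] <;> simp [h] at hm
  | succ k ih =>
    intro v xs ys t hm
    match xs with
    | [] =>
      rw [if_neg (List.not_mem_nil)]
      simp only [tagT, List.map_nil, List.nil_append, List.foldl_nil, List.append_nil]
      cases ys with
      | nil =>
        rw [show (List.map (fun p => (p.1, p.2, t + 1)) ([] : List (Int × Int))) = [] from rfl]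
        rw [bfsLoopB_nil]
        simp [bfsLoop]
      | cons y ys' =>
        have hih := ih v (y :: ys') [] (t + 1) (by
          rw [if_neg (List.cons_ne_nil y ys')]
          rw [if_pos rfl] at hm
          simp only [List.length_cons, List.length_nil] at hm ⊢
          omega)
        rw [bfsLoopB_cons]
        simp only [tagT, List.map_nil, List.append_nil, List.map_cons, List.nil_append] at hih ⊢
        rw [hih]
    | (a, b) :: xs' =>
      have htag : tagT t ((a, b) :: xs') ++ tagT (t + 1) ys
          = (a, b, t) :: (tagT t xs' ++ tagT (t + 1) ys) := by simp [tagT]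
      rw [htag, bfsLoop]
      by_cases htgt : a = tr ∧ b = tc
      · rw [if_pos htgt]
        have hmem : (tr, tc) ∈ (a, b) :: xs' := by
          rcases htgt with ⟨h1, h2⟩; subst h1; subst h2; exact List.mem_cons_self
        rw [if_pos hmem]
      · rw [if_neg htgt]
        rw [bfsFold_expand maps rows cols a b t v (tagT t xs') ys]
        rw [expandCell_P maps rows cols v ys (a, b)]
        dsimp only
        have hmeas := expandCell_measure maps rows cols (v, []) (a, b)
        dsimp only at hmeas
        simp only [List.length_nil, Nat.add_zero] at hmeas
        have hih := ih (expandCell maps rows cols (v, []) (a, b)).1 xs'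
          (ys ++ (expandCell maps rows cols (v, []) (a, b)).2) t (by
            rw [if_neg (List.cons_ne_nil (a, b) xs')] at hm
            simp only [List.length_cons, List.length_append] at hm ⊢
            rcases hmeas with ⟨h1, h2⟩
            by_cases hx : xs' = []
            · rw [if_pos hx]
              omega
            · rw [if_neg hx]
              omega)
        rw [hih]
        have hnotmk : ¬ ((tr, tc) = (a, b)) := by
          intro h
          rw [Prod.mk.injEq] at h
          exact htgt ⟨h.1.symm, h.2.symm⟩
        by_cases hmem2 : (tr, tc) ∈ xs'
        · rw [if_pos hmem2, if_pos (List.mem_cons_of_mem _ hmem2)]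
        · rw [if_neg hmem2, if_neg (by
            rw [List.mem_cons]
            rintro (h | h)
            · exact hnotmk h
            · exact hmem2 h)]
          rw [show ((a, b) :: xs').foldl (expandCell maps rows cols) (v, [])
              = xs'.foldl (expandCell maps rows cols) (expandCell maps rows cols (v, []) (a, b)) from rfl]
          rw [show expandCell maps rows cols (v, []) (a, b)
              = ((expandCell maps rows cols (v, []) (a, b)).1,
                 (expandCell maps rows cols (v, []) (a, b)).2) from rfl]
          rw [expandAll_acc maps rows cols xs' (expandCell maps rows cols (v, []) (a, b)).1
            (expandCell maps rows cols (v, []) (a, b)).2]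
          dsimp only
          rw [List.append_assoc]

theorem bfs_gen (maps : List String) (rows cols sr sc tr tc : Int) :
    bfsLoop maps rows cols tr tc [(sr, sc, 0)] (vset (initV rows cols) sr sc)
      = bfsLoopB maps rows cols (tr, tc) (vset (initV rows cols) sr sc) [(sr, sc)] 0 := by
  have h := main_corr maps rows cols tr tc
    (2 * (falseCount (vset (initV rows cols) sr sc) + 1 + 0) + 0)
    (vset (initV rows cols) sr sc) [(sr, sc)] [] 0 (by simp)
  have htag : tagT 0 [(sr, sc)] ++ tagT (0 + 1) [] = [(sr, sc, 0)] := by simp [tagT]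
  rw [htag] at h
  rw [h, bfsLoopB_cons]
  simp

theorem reach_gen (maps : List String) (rows cols sr sc tr tc : Int) :
    reachLoop maps rows cols tr tc [(sr, sc)] (vset (initV rows cols) sr sc)
      = decide (bfsLoop maps rows cols tr tc [(sr, sc, 0)] (vset (initV rows cols) sr sc) ≠ -1) := by
  have h := reach_eq_bfs maps rows cols tr tc
    (falseCount (vset (initV rows cols) sr sc) + 1) [(sr, sc, 0)]
    (vset (initV rows cols) sr sc) (by simp)
    (by intro x hx; simp at hx; subst hx; simp)
  simpa [dropT] using h

theorem reachA_eq_bfsA (maps : List String) (sr sc tr tc : Int) :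
    isReachableA sr sc tr tc maps = decide (bfsA sr sc tr tc maps ≠ -1) := by
  unfold isReachableA bfsA
  exact reach_gen maps _ _ sr sc tr tc

-- ===== the matrix ↔ seen-set bisimulation =====

def Shape (rows cols : Int) (v : List (List Bool)) : Prop :=
  v.length = rows.toNat ∧ ∀ row ∈ v, row.length = cols.toNat

def RelVS (rows cols : Int) (v : List (List Bool)) (seen : PySem.Set (Int × Int)) : Prop :=
  Shape rows cols v ∧
  ∀ r c : Int, 0 ≤ r → r < rows → 0 ≤ c → c < cols →
    vget v r c = PySem.Set.contains seen (r, c)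

theorem shape_vset (rows cols : Int) (v : List (List Bool)) (hsh : Shape rows cols v)
    (a b : Int) : Shape rows cols (vset v a b) := by
  obtain ⟨h1, h2⟩ := hsh
  refine ⟨by simpa [vset] using h1, ?_⟩
  intro row hrow
  obtain ⟨i, hi, hrowi⟩ := List.getElem_of_mem hrow
  simp only [vset, List.length_modify] at hi
  simp only [vset] at hrowi
  rw [List.getElem_modify] at hrowi
  by_cases hab : a.toNat = i
  · rw [if_pos hab] at hrowi
    rw [← hrowi, List.length_set]
    exact h2 v[i] (List.getElem_mem hi)
  · rw [if_neg hab] at hrowi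
    rw [← hrowi]
    exact h2 v[i] (List.getElem_mem hi)

theorem vget_vset (rows cols : Int) (v : List (List Bool)) (hsh : Shape rows cols v)
    (a b : Int) (ha0 : 0 ≤ a) (har : a < rows) (hb0 : 0 ≤ b) (hbc : b < cols)
    (r c : Int) (hr0 : 0 ≤ r) (hrr : r < rows) (hc0 : 0 ≤ c) (hcc : c < cols) :
    vget (vset v a b) r c = if r = a ∧ c = b then true else vget v r c := by
  obtain ⟨h1, h2⟩ := hsh
  have hra : r.toNat = a.toNat ↔ r = a := by omega
  have hcb : c.toNat = b.toNat ↔ c = b := by omega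
  have hilen : a.toNat < v.length := by omega
  unfold vget vset
  have hget : ∀ (l : List (List Bool)) (i : Nat) (hil : i < l.length), l.getD i [] = l[i]'hil := by
    intro l i hil
    simp [List.getD, List.getElem?_eq_getElem hil]
  by_cases hreq : r = a
  · subst hreq
    by_cases hceq : c = b
    · subst hceq
      rw [if_pos ⟨rfl, rfl⟩]
      rw [hget _ r.toNat (by simp only [List.length_modify]; omega)]
      rw [List.getElem_modify, if_pos rfl]
      have hrowlen : v[r.toNat].length = cols.toNat := h2 _ (List.getElem_mem hilen)
      have hblen : c.toNat < v[r.toNat].length := by omega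
      simp [List.getD, hblen]
    · rw [if_neg (by rintro ⟨_, h⟩; exact hceq h)]
      rw [hget _ r.toNat (by simp only [List.length_modify]; omega),
          hget _ r.toNat (by omega)]
      rw [List.getElem_modify, if_pos rfl]
      have hcn : b.toNat ≠ c.toNat := by omega
      simp [List.getD, hcn]
  · have hrn : a.toNat ≠ r.toNat := by omega
    rw [if_neg (by rintro ⟨h, _⟩; exact hreq h)]
    rw [hget _ r.toNat (by simp only [List.length_modify]; omega),
        hget _ r.toNat (by omega)]
    rw [List.getElem_modify, if_neg hrn]

theorem stepRel (maps : List String) (rows cols : Int)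
    (v : List (List Bool)) (seen : PySem.Set (Int × Int)) (acc : List (Int × Int))
    (p : Int × Int) (h : RelVS rows cols v seen) :
    (stepB maps rows cols (v, acc) p).2 = (tryVisit maps rows cols (seen, acc) p).2 ∧
    RelVS rows cols (stepB maps rows cols (v, acc) p).1
      (tryVisit maps rows cols (seen, acc) p).1 := by
  unfold stepB tryVisit
  dsimp only
  by_cases hb : 0 ≤ p.1 ∧ p.1 < rows ∧ 0 ≤ p.2 ∧ p.2 < cols
  · have hvc : vget v p.1 p.2 = PySem.Set.contains seen p := by
      have := h.2 p.1 p.2 hb.1 hb.2.1 hb.2.2.1 hb.2.2.2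
      simpa using this
    by_cases hg : vget v p.1 p.2 = false ∧ charAt maps p.1 p.2 ≠ 'X'
    · rw [if_pos ⟨hb.1, hb.2.1, hb.2.2.1, hb.2.2.2, hg.1, hg.2⟩,
          if_pos ⟨hb.1, hb.2.1, hb.2.2.1, hb.2.2.2, by rw [← hvc]; exact hg.1, hg.2⟩]
      have hns : PySem.Set.contains seen p = false := by rw [← hvc]; exact hg.1
      have hpm : p ∉ seen := fun hmem => by
        simp only [PySem.Set.contains_eq_listContains, List.contains_eq_mem,
          decide_eq_false_iff_not] at hns
        exact hns hmem
      have hadd : PySem.Set.add seen p = seen ++ [p] := by simp [PySem.Set.add, hpm]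
      refine ⟨rfl, shape_vset rows cols v h.1 p.1 p.2, ?_⟩
      intro r c hr0 hrr hc0 hcc
      rw [vget_vset rows cols v h.1 p.1 p.2 hb.1 hb.2.1 hb.2.2.1 hb.2.2.2 r c hr0 hrr hc0 hcc]
      rw [hadd]
      by_cases hq : r = p.1 ∧ c = p.2
      · have hrc : (r, c) = p := by
          rcases hq with ⟨hq1, hq2⟩; rw [hq1, hq2]
        rw [if_pos hq, hrc]
        simp
      · have hrc : (r, c) ≠ p := by
          intro hcon
          rw [← hcon] at hq
          exact hq ⟨rfl, rfl⟩
        rw [if_neg hq, h.2 r c hr0 hrr hc0 hcc]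
        simp [hrc]
    · rw [if_neg (by rintro ⟨_, _, _, _, h5, h6⟩; exact hg ⟨h5, h6⟩),
          if_neg (by rintro ⟨_, _, _, _, h5, h6⟩; exact hg ⟨by rw [hvc]; exact h5, h6⟩)]
      exact ⟨rfl, h⟩
  · rw [if_neg (by rintro ⟨h1, h2, h3, h4, _⟩; exact hb ⟨h1, h2, h3, h4⟩),
        if_neg (by rintro ⟨h1, h2, h3, h4, _⟩; exact hb ⟨h1, h2, h3, h4⟩)]
    exact ⟨rfl, h⟩

theorem foldRel (maps : List String) (rows cols : Int) :
    ∀ (ps : List (Int × Int)) (v : List (List Bool)) (seen : PySem.Set (Int × Int))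
      (acc : List (Int × Int)), RelVS rows cols v seen →
      (ps.foldl (stepB maps rows cols) (v, acc)).2
          = (ps.foldl (tryVisit maps rows cols) (seen, acc)).2 ∧
      RelVS rows cols (ps.foldl (stepB maps rows cols) (v, acc)).1
        (ps.foldl (tryVisit maps rows cols) (seen, acc)).1 := by
  intro ps
  induction ps with
  | nil => intro v seen acc h; exact ⟨rfl, h⟩
  | cons p tl ih =>
    intro v seen acc h
    simp only [List.foldl_cons]
    have h1 := stepRel maps rows cols v seen acc p h
    have ih' := ih (stepB maps rows cols (v, acc) p).1
      (tryVisit maps rows cols (seen, acc) p).1 (stepB maps rows cols (v, acc) p).2 h1.2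
    rw [← Prod.mk.eta (p := stepB maps rows cols (v, acc) p),
        ← Prod.mk.eta (p := tryVisit maps rows cols (seen, acc) p), ← h1.1]
    exact ih'

theorem layerRel (maps : List String) (rows cols : Int) :
    ∀ (xs : List (Int × Int)) (v : List (List Bool)) (seen : PySem.Set (Int × Int))
      (acc : List (Int × Int)), RelVS rows cols v seen →
      (xs.foldl (expandCell maps rows cols) (v, acc)).2
          = (xs.foldl (expandS maps rows cols) (seen, acc)).2 ∧
      RelVS rows cols (xs.foldl (expandCell maps rows cols) (v, acc)).1
        (xs.foldl (expandS maps rows cols) (seen, acc)).1 := by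
  intro xs
  induction xs with
  | nil => intro v seen acc h; exact ⟨rfl, h⟩
  | cons x tl ih =>
    intro v seen acc h
    simp only [List.foldl_cons]
    have h1 : (expandCell maps rows cols (v, acc) x).2
          = (expandS maps rows cols (seen, acc) x).2 ∧
        RelVS rows cols (expandCell maps rows cols (v, acc) x).1
          (expandS maps rows cols (seen, acc) x).1 := by
      rw [expandCell_eq_foldl]
      unfold expandS
      exact foldRel maps rows cols (neighbors x) v seen acc h
    have ih' := ih (expandCell maps rows cols (v, acc) x).1
      (expandS maps rows cols (seen, acc) x).1 (expandCell maps rows cols (v, acc) x).2 h1.2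
    rw [← Prod.mk.eta (p := expandCell maps rows cols (v, acc) x),
        ← Prod.mk.eta (p := expandS maps rows cols (seen, acc) x), ← h1.1]
    exact ih'

theorem legLoop_nil (maps : List String) (rows cols : Int) (dst : Int × Int)
    (seen : PySem.Set (Int × Int)) (t : Int) :
    legLoop maps rows cols dst seen [] t = -1 := by
  rw [legLoop]; simp

theorem legLoop_cons (maps : List String) (rows cols : Int) (dst : Int × Int)
    (seen : PySem.Set (Int × Int)) (x : Int × Int) (f : List (Int × Int)) (t : Int) :
    legLoop maps rows cols dst seen (x :: f) t
      = if dst ∈ x :: f then t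
        else legLoop maps rows cols dst
          ((x :: f).foldl (expandS maps rows cols) (seen, [])).1
          ((x :: f).foldl (expandS maps rows cols) (seen, [])).2 (t + 1) := by
  rw [legLoop]; simp

theorem loopRel (maps : List String) (rows cols : Int) (dst : Int × Int) :
    ∀ (k : Nat) (v : List (List Bool)) (seen : PySem.Set (Int × Int))
      (frontier : List (Int × Int)) (t : Int),
      RelVS rows cols v seen →
      2 * falseCount v + (if frontier = [] then 0 else 1) ≤ k →
      bfsLoopB maps rows cols dst v frontier t = legLoop maps rows cols dst seen frontier t := by
  intro k
  induction k with
  | zero =>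
    intro v seen frontier t _ hm
    have hf : frontier = [] := by
      by_contra h
      simp [h] at hm
    subst hf
    rw [bfsLoopB_nil, legLoop_nil]
  | succ k ih =>
    intro v seen frontier t hrel hm
    match frontier with
    | [] => rw [bfsLoopB_nil, legLoop_nil]
    | x :: f' =>
      rw [bfsLoopB_cons, legLoop_cons]
      by_cases htgt : dst ∈ x :: f'
      · rw [if_pos htgt, if_pos htgt]
      · rw [if_neg htgt, if_neg htgt]
        have hlay := layerRel maps rows cols (x :: f') v seen [] hrel
        have hmeas := foldl_step_measure falseCount (expandCell maps rows cols)
          (expandCell_measure maps rows cols) (x :: f') (v, [])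
        dsimp only at hmeas
        simp only [List.length_nil, Nat.add_zero] at hmeas
        have hm' : 2 * falseCount v ≤ k := by
          rw [if_neg (List.cons_ne_nil x f')] at hm
          omega
        rw [← hlay.1]
        refine ih _ _ _ _ hlay.2 ?_
        by_cases hnil : ((x :: f').foldl (expandCell maps rows cols) (v, [])).2 = []
        · rw [if_pos hnil]
          omega
        · have hlen := List.length_pos_iff.mpr hnil
          rw [if_neg hnil]
          omega

theorem relInit (rows cols : Int) (p : Int × Int)
    (hp : 0 ≤ p.1 ∧ p.1 < rows ∧ 0 ≤ p.2 ∧ p.2 < cols) :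
    RelVS rows cols (vset (initV rows cols) p.1 p.2) (PySem.Set.ofList [p]) := by
  have hshI : Shape rows cols (initV rows cols) := by
    refine ⟨by simp [initV], ?_⟩
    intro row hrow
    rw [List.eq_of_mem_replicate hrow]
    simp
  have hof : PySem.Set.ofList [p] = [p] := by
    apply PySem.Set.ofList_eq_self_of_nodup
    simp
  refine ⟨shape_vset rows cols _ hshI p.1 p.2, ?_⟩
  intro r c hr0 hrr hc0 hcc
  rw [vget_vset rows cols _ hshI p.1 p.2 hp.1 hp.2.1 hp.2.2.1 hp.2.2.2 r c hr0 hrr hc0 hcc]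
  rw [hof]
  by_cases hq : r = p.1 ∧ c = p.2
  · have hrc : (r, c) = p := by rcases hq with ⟨hq1, hq2⟩; rw [hq1, hq2]
    rw [if_pos hq, hrc]
    simp
  · have hrc : (r, c) ≠ p := by
      intro hcon
      rw [← hcon] at hq
      exact hq ⟨rfl, rfl⟩
    rw [if_neg hq]
    have hzero : vget (initV rows cols) r c = false := by
      unfold vget initV
      have h1 : r.toNat < rows.toNat := by omega
      have h2 : c.toNat < cols.toNat := by omega
      simp [List.getD, h1, h2]
    rw [hzero]
    simp [hrc]

theorem bfsA_eq_legB (maps : List String) (src dst : Int × Int)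
    (hsrc : 0 ≤ src.1 ∧ src.1 < (maps.length : Int) ∧ 0 ≤ src.2 ∧
      src.2 < (((PySem.List.pyGet? maps 0).getD "").toList.length : Int)) :
    bfsA src.1 src.2 dst.1 dst.2 maps
      = legB maps (maps.length : Int)
          (((PySem.List.pyGet? maps 0).getD "").toList.length : Int) src dst := by
  unfold bfsA legB
  rw [bfs_gen]
  simp only [Prod.mk.eta]
  exact loopRel maps (maps.length : Int)
    (((PySem.List.pyGet? maps 0).getD "").toList.length : Int) dst
    (2 * falseCount (vset (initV (maps.length : Int)
      (((PySem.List.pyGet? maps 0).getD "").toList.length : Int)) src.1 src.2) + 1)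
    _ _ _ _ (relInit _ _ src hsrc) (by rw [if_neg (List.cons_ne_nil _ _)])

-- ===== the S/L/E scan =====

def scanStep (maps : List String)
    (acc : Option (Int × Int) × Option (Int × Int) × Option (Int × Int)) (p : Int × Int) :
    Option (Int × Int) × Option (Int × Int) × Option (Int × Int) :=
  if charAt maps p.1 p.2 = 'S' then (some p, acc.2.1, acc.2.2)
  else if charAt maps p.1 p.2 = 'L' then (acc.1, some p, acc.2.2)
  else if charAt maps p.1 p.2 = 'E' then (acc.1, acc.2.1, some p)
  else acc

def scanStepB (maps : List String) (d : PySem.Dict Char (Int × Int)) (p : Int × Int) :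
    PySem.Dict Char (Int × Int) :=
  if charAt maps p.1 p.2 = 'S' ∨ charAt maps p.1 p.2 = 'L' ∨ charAt maps p.1 p.2 = 'E' then
    d.insert (charAt maps p.1 p.2) p
  else d

theorem scanStep_S (maps : List String) (acc : Option (Int × Int) × Option (Int × Int) × Option (Int × Int))
    (p : Int × Int) (h : charAt maps p.1 p.2 = 'S') :
    scanStep maps acc p = (some p, acc.2.1, acc.2.2) := by
  unfold scanStep; rw [if_pos h]

theorem scanStep_L (maps : List String) (acc : Option (Int × Int) × Option (Int × Int) × Option (Int × Int))
    (p : Int × Int) (h1 : ¬ charAt maps p.1 p.2 = 'S') (h2 : charAt maps p.1 p.2 = 'L') :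
    scanStep maps acc p = (acc.1, some p, acc.2.2) := by
  unfold scanStep; rw [if_neg h1, if_pos h2]

theorem scanStep_E (maps : List String) (acc : Option (Int × Int) × Option (Int × Int) × Option (Int × Int))
    (p : Int × Int) (h1 : ¬ charAt maps p.1 p.2 = 'S') (h2 : ¬ charAt maps p.1 p.2 = 'L')
    (h3 : charAt maps p.1 p.2 = 'E') :
    scanStep maps acc p = (acc.1, acc.2.1, some p) := by
  unfold scanStep; rw [if_neg h1, if_neg h2, if_pos h3]

theorem scanStep_N (maps : List String) (acc : Option (Int × Int) × Option (Int × Int) × Option (Int × Int))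
    (p : Int × Int) (h1 : ¬ charAt maps p.1 p.2 = 'S') (h2 : ¬ charAt maps p.1 p.2 = 'L')
    (h3 : ¬ charAt maps p.1 p.2 = 'E') :
    scanStep maps acc p = acc := by
  unfold scanStep; rw [if_neg h1, if_neg h2, if_neg h3]

theorem scanStepB_ch (maps : List String) (d : PySem.Dict Char (Int × Int)) (p : Int × Int)
    (h : charAt maps p.1 p.2 = 'S' ∨ charAt maps p.1 p.2 = 'L' ∨ charAt maps p.1 p.2 = 'E') :
    scanStepB maps d p = d.insert (charAt maps p.1 p.2) p := by
  unfold scanStepB; rw [if_pos h]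

theorem scanStepB_N (maps : List String) (d : PySem.Dict Char (Int × Int)) (p : Int × Int)
    (h1 : ¬ charAt maps p.1 p.2 = 'S') (h2 : ¬ charAt maps p.1 p.2 = 'L')
    (h3 : ¬ charAt maps p.1 p.2 = 'E') :
    scanStepB maps d p = d := by
  unfold scanStepB
  rw [if_neg (by rintro (h | h | h) <;> [exact h1 h; exact h2 h; exact h3 h])]

theorem scanA_cells (maps : List String) (rows cols : Int) :
    scanA maps rows cols = (allCells rows cols).foldl (scanStep maps) (none, none, none) := by
  unfold scanA allCells scanStep
  rw [List.foldl_flatMap]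
  simp only [List.foldl_map]

theorem hasCh_cells (maps : List String) (ch : Char) :
    hasCh maps ch
      = (allCells (maps.length : Int) (((maps.headD "").toList.length : Int))).any
          (fun p => charAt maps p.1 p.2 = ch) := by
  unfold hasCh allCells
  rw [List.any_flatMap]
  simp only [List.any_map, Function.comp_def]

theorem scan_S (maps : List String) :
    ∀ (cells : List (Int × Int)) (acc : Option (Int × Int) × Option (Int × Int) × Option (Int × Int)),
      ((cells.foldl (scanStep maps) acc).1).isSome
        = (acc.1.isSome || cells.any (fun p => charAt maps p.1 p.2 = 'S')) := by
  intro cells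
  induction cells with
  | nil => intro acc; simp
  | cons x tl ih =>
    intro acc
    simp only [List.foldl_cons, List.any_cons]
    by_cases h1 : charAt maps x.1 x.2 = 'S'
    · rw [scanStep_S maps acc x h1, ih]; simp [h1]
    · by_cases h2 : charAt maps x.1 x.2 = 'L'
      · rw [scanStep_L maps acc x h1 h2, ih]; simp [h2]
      · by_cases h3 : charAt maps x.1 x.2 = 'E'
        · rw [scanStep_E maps acc x h1 h2 h3, ih]; simp [h3]
        · rw [scanStep_N maps acc x h1 h2 h3, ih]; simp [h1]

theorem scan_L (maps : List String) :
    ∀ (cells : List (Int × Int)) (acc : Option (Int × Int) × Option (Int × Int) × Option (Int × Int)),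
      ((cells.foldl (scanStep maps) acc).2.1).isSome
        = (acc.2.1.isSome || cells.any (fun p => charAt maps p.1 p.2 = 'L')) := by
  intro cells
  induction cells with
  | nil => intro acc; simp
  | cons x tl ih =>
    intro acc
    simp only [List.foldl_cons, List.any_cons]
    by_cases h1 : charAt maps x.1 x.2 = 'S'
    · rw [scanStep_S maps acc x h1, ih]; simp [h1]
    · by_cases h2 : charAt maps x.1 x.2 = 'L'
      · rw [scanStep_L maps acc x h1 h2, ih]; simp [h2]
      · by_cases h3 : charAt maps x.1 x.2 = 'E'
        · rw [scanStep_E maps acc x h1 h2 h3, ih]; simp [h3]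
        · rw [scanStep_N maps acc x h1 h2 h3, ih]; simp [h2]

theorem scan_E (maps : List String) :
    ∀ (cells : List (Int × Int)) (acc : Option (Int × Int) × Option (Int × Int) × Option (Int × Int)),
      ((cells.foldl (scanStep maps) acc).2.2).isSome
        = (acc.2.2.isSome || cells.any (fun p => charAt maps p.1 p.2 = 'E')) := by
  intro cells
  induction cells with
  | nil => intro acc; simp
  | cons x tl ih =>
    intro acc
    simp only [List.foldl_cons, List.any_cons]
    by_cases h1 : charAt maps x.1 x.2 = 'S'
    · rw [scanStep_S maps acc x h1, ih]; simp [h1]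
    · by_cases h2 : charAt maps x.1 x.2 = 'L'
      · rw [scanStep_L maps acc x h1 h2, ih]; simp [h2]
      · by_cases h3 : charAt maps x.1 x.2 = 'E'
        · rw [scanStep_E maps acc x h1 h2 h3, ih]; simp [h3]
        · rw [scanStep_N maps acc x h1 h2 h3, ih]; simp [h3]

-- B's dict tracks exactly A's three option variables
theorem scan_rel (maps : List String) :
    ∀ (cells : List (Int × Int)) (acc : Option (Int × Int) × Option (Int × Int) × Option (Int × Int))
      (d : PySem.Dict Char (Int × Int)),
      d.get? 'S' = acc.1 → d.get? 'L' = acc.2.1 → d.get? 'E' = acc.2.2 →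
      ((cells.foldl (scanStepB maps) d).get? 'S' = (cells.foldl (scanStep maps) acc).1 ∧
       (cells.foldl (scanStepB maps) d).get? 'L' = (cells.foldl (scanStep maps) acc).2.1 ∧
       (cells.foldl (scanStepB maps) d).get? 'E' = (cells.foldl (scanStep maps) acc).2.2) := by
  intro cells
  induction cells with
  | nil => intro acc d h1 h2 h3; exact ⟨h1, h2, h3⟩
  | cons x tl ih =>
    intro acc d h1 h2 h3
    simp only [List.foldl_cons]
    by_cases hS : charAt maps x.1 x.2 = 'S'
    · rw [scanStep_S maps acc x hS, scanStepB_ch maps d x (Or.inl hS), hS]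
      refine ih _ _ ?_ ?_ ?_
      · simp [PySem.Dict.get?_insert_self]
      · rw [PySem.Dict.get?_insert_of_ne _ _ (by decide)]; exact h2
      · rw [PySem.Dict.get?_insert_of_ne _ _ (by decide)]; exact h3
    · by_cases hL : charAt maps x.1 x.2 = 'L'
      · rw [scanStep_L maps acc x hS hL, scanStepB_ch maps d x (Or.inr (Or.inl hL)), hL]
        refine ih _ _ ?_ ?_ ?_
        · rw [PySem.Dict.get?_insert_of_ne _ _ (by decide)]; exact h1
        · simp [PySem.Dict.get?_insert_self]
        · rw [PySem.Dict.get?_insert_of_ne _ _ (by decide)]; exact h3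
      · by_cases hE : charAt maps x.1 x.2 = 'E'
        · rw [scanStep_E maps acc x hS hL hE, scanStepB_ch maps d x (Or.inr (Or.inr hE)), hE]
          refine ih _ _ ?_ ?_ ?_
          · rw [PySem.Dict.get?_insert_of_ne _ _ (by decide)]; exact h1
          · rw [PySem.Dict.get?_insert_of_ne _ _ (by decide)]; exact h2
          · simp [PySem.Dict.get?_insert_self]
        · rw [scanStep_N maps acc x hS hL hE, scanStepB_N maps d x hS hL hE]
          exact ih _ _ h1 h2 h3

-- every position the scan records is one of the scanned cells
theorem scan_bounds (maps : List String) (rows cols : Int) :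
    ∀ (cells : List (Int × Int))
      (acc : Option (Int × Int) × Option (Int × Int) × Option (Int × Int)),
      (∀ p ∈ cells, 0 ≤ p.1 ∧ p.1 < rows ∧ 0 ≤ p.2 ∧ p.2 < cols) →
      (∀ p, acc.1 = some p → 0 ≤ p.1 ∧ p.1 < rows ∧ 0 ≤ p.2 ∧ p.2 < cols) →
      (∀ p, acc.2.1 = some p → 0 ≤ p.1 ∧ p.1 < rows ∧ 0 ≤ p.2 ∧ p.2 < cols) →
      (∀ p, acc.2.2 = some p → 0 ≤ p.1 ∧ p.1 < rows ∧ 0 ≤ p.2 ∧ p.2 < cols) →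
      ((∀ p, (cells.foldl (scanStep maps) acc).1 = some p → 0 ≤ p.1 ∧ p.1 < rows ∧ 0 ≤ p.2 ∧ p.2 < cols) ∧
       (∀ p, (cells.foldl (scanStep maps) acc).2.1 = some p → 0 ≤ p.1 ∧ p.1 < rows ∧ 0 ≤ p.2 ∧ p.2 < cols) ∧
       (∀ p, (cells.foldl (scanStep maps) acc).2.2 = some p → 0 ≤ p.1 ∧ p.1 < rows ∧ 0 ≤ p.2 ∧ p.2 < cols)) := by
  intro cells
  induction cells with
  | nil => intro acc _ h1 h2 h3; exact ⟨h1, h2, h3⟩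
  | cons x tl ih =>
    intro acc hc h1 h2 h3
    simp only [List.foldl_cons]
    have hx := hc x List.mem_cons_self
    have hc' := fun p hp => hc p (List.mem_cons_of_mem x hp)
    by_cases hS : charAt maps x.1 x.2 = 'S'
    · rw [scanStep_S maps acc x hS]
      refine ih _ hc' ?_ h2 h3
      intro p hp
      dsimp only at hp
      exact (Option.some.inj hp) ▸ hx
    · by_cases hL : charAt maps x.1 x.2 = 'L'
      · rw [scanStep_L maps acc x hS hL]
        refine ih _ hc' h1 ?_ h3
        intro p hp
        dsimp only at hp
        exact (Option.some.inj hp) ▸ hx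
      · by_cases hE : charAt maps x.1 x.2 = 'E'
        · rw [scanStep_E maps acc x hS hL hE]
          refine ih _ hc' h1 h2 ?_
          intro p hp
          dsimp only at hp
          exact (Option.some.inj hp) ▸ hx
        · rw [scanStep_N maps acc x hS hL hE]
          exact ih _ hc' h1 h2 h3


theorem head_eq (maps : List String) (hne : maps ≠ []) :
    ((PySem.List.pyGet? maps 0).getD "") = maps.headD "" := by
  cases maps with
  | nil => exact absurd rfl hne
  | cons m t => rw [PySem.List.pyGet?_zero_cons]; rfl

-- B's enumerate scan visits exactly the rows × cols cells, in the same order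
theorem scanB_cells (maps : List String) (hne : maps ≠ [])
    (hlen : ∀ s ∈ maps, (maps.headD "").toList.length ≤ s.toList.length) :
    scanB maps (((PySem.List.pyGet? maps 0).getD "").toList.length : Int)
      = (allCells (maps.length : Int)
          (((PySem.List.pyGet? maps 0).getD "").toList.length : Int)).foldl
          (scanStepB maps) PySem.Dict.empty := by
  unfold scanB allCells
  rw [List.foldl_flatMap]
  simp only [List.foldl_map]
  rw [PySem.List.enumerate_eq_map_pyRange maps ""]
  rw [List.foldl_map]
  have hlen' : PySem.List.len maps = (maps.length : Int) := by
    simp [PySem.List.len_eq]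
  rw [hlen']
  refine PySem.List.foldl_congr_mem _ _ _ _ ?_
  intro d r hr
  obtain ⟨hr0, hrr⟩ := PySem.List.mem_pyRange_one.mp hr
  dsimp only
  -- the r-th row
  have hrowe : PySem.List.pyGetD maps r "" = maps[r.toNat]'(by omega) :=
    PySem.List.pyGetD_eq_getElem maps "" hr0 hrr
  have hrmem : maps[r.toNat]'(by omega) ∈ maps := List.getElem_mem (by omega)
  have hclen : ((PySem.List.pyGet? maps 0).getD "").toList.length
      ≤ (maps[r.toNat]'(by omega)).toList.length := by
    rw [head_eq maps hne]
    exact hlen _ hrmem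
  set colsN : Nat := ((PySem.List.pyGet? maps 0).getD "").toList.length with hcolsN
  have hslice : PySem.List.slice (PySem.List.pyGetD maps r "").toList none (some (colsN : Int))
      = (maps[r.toNat]'(by omega)).toList.take colsN := by
    rw [hrowe, PySem.List.slice_to _ (by positivity)]
    simp
  rw [hslice]
  have htklen : ((maps[r.toNat]'(by omega)).toList.take colsN).length = colsN := by
    rw [List.length_take]
    omega
  rw [PySem.List.enumerate_eq_map_pyRange _ ' ']
  rw [List.foldl_map]
  have hlen2 : PySem.List.len ((maps[r.toNat]'(by omega)).toList.take colsN) = (colsN : Int) := by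
    simp [PySem.List.len_eq, htklen]
  rw [hlen2]
  refine PySem.List.foldl_congr_mem _ _ _ _ ?_
  intro d' c hc
  obtain ⟨hc0, hcc⟩ := PySem.List.mem_pyRange_one.mp hc
  dsimp only
  have hcn : c.toNat < colsN := by omega
  have hch : PySem.List.pyGetD ((maps[r.toNat]'(by omega)).toList.take colsN) c ' '
      = charAt maps r c := by
    rw [PySem.List.pyGetD_eq_getElem _ ' ' hc0 (by rw [htklen]; omega)]
    rw [List.getElem_take]
    unfold charAt
    have h1 : (PySem.List.pyGet? maps r).getD "" = maps[r.toNat]'(by omega) := hrowe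
    rw [h1]
    rw [show (PySem.List.pyGet? (maps[r.toNat]'(by omega)).toList c).getD ' '
        = PySem.List.pyGetD (maps[r.toNat]'(by omega)).toList c ' ' from rfl]
    rw [PySem.List.pyGetD_eq_getElem _ ' ' hc0 (by omega)]
  rw [hch]
  unfold scanStepB
  rfl

theorem dict_contains_isSome {κ ν : Type} [BEq κ] [LawfulBEq κ] (d : PySem.Dict κ ν) (k : κ) :
    d.contains k = (d.get? k).isSome := by
  rcases h : d.get? k with _ | v
  · have h2 := (PySem.Dict.get?_eq_none_iff_contains d k).mp h
    rw [h2]; rfl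
  · have h2 : ¬ d.get? k = none := by rw [h]; simp
    rw [(PySem.Dict.get?_eq_none_iff_contains d k).not] at h2
    simp at h2
    rw [h2]; rfl

theorem solution_eq (maps : List String) (hpre : Pre_solution maps) :
    solution maps = solution_alt maps := by
  obtain ⟨hne, hlen, hS⟩ := hpre
  unfold solution solution_alt
  dsimp only
  have hhead := head_eq maps hne
  set rows : Int := (maps.length : Int) with hrows
  set cols : Int := (((PySem.List.pyGet? maps 0).getD "").toList.length : Int) with hcols
  have hscan : scanB maps cols = (allCells rows cols).foldl (scanStepB maps) PySem.Dict.empty :=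
    scanB_cells maps hne hlen
  have hrel := scan_rel maps (allCells rows cols) (none, none, none) PySem.Dict.empty
    (by simp) (by simp) (by simp)
  rw [← scanA_cells, ← hscan] at hrel
  obtain ⟨hS', hL', hE'⟩ := hrel
  have hbnd := scan_bounds maps rows cols (allCells rows cols) (none, none, none)
    (fun p hp => (mem_allCells rows cols p).mp hp)
    (by simp) (by simp) (by simp)
  rw [← scanA_cells] at hbnd
  rw [dict_contains_isSome, dict_contains_isSome, hS', hL', hE']
  rcases hLa : (scanA maps rows cols).2.1 with _ | lever
  · simp
  rcases hEa : (scanA maps rows cols).2.2 with _ | exitp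
  · simp
  -- both L and E were found, so Pre_ gives us S
  have hcolshead : cols = ((maps.headD "").toList.length : Int) := by rw [hcols, hhead]
  have hhasL : hasCh maps 'L' = true := by
    rw [hasCh_cells, ← hrows, ← hcolshead]
    have := scan_L maps (allCells rows cols) (none, none, none)
    rw [← scanA_cells] at this
    rw [hLa] at this
    simpa using this.symm
  have hhasE : hasCh maps 'E' = true := by
    rw [hasCh_cells, ← hrows, ← hcolshead]
    have := scan_E maps (allCells rows cols) (none, none, none)
    rw [← scanA_cells] at this
    rw [hEa] at this
    simpa using this.symm
  have hhasS := hS hhasL hhasE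
  have hSa : ((scanA maps rows cols).1).isSome = true := by
    have := scan_S maps (allCells rows cols) (none, none, none)
    rw [← scanA_cells] at this
    rw [this]
    rw [hasCh_cells, ← hrows, ← hcolshead] at hhasS
    simpa using hhasS
  obtain ⟨start, hSs⟩ := Option.isSome_iff_exists.mp hSa
  have hstartb := hbnd.1 start hSs
  have hleverb := hbnd.2.1 lever hLa
  rcases start with ⟨sr, sc⟩
  rcases lever with ⟨lr, lc⟩
  rcases exitp with ⟨er, ec⟩
  rw [hSs]
  rw [if_neg (by simp)]
  dsimp only
  simp only [Option.getD_some]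
  rw [reachA_eq_bfsA, reachA_eq_bfsA,
    bfsA_eq_legB maps (sr, sc) (lr, lc) hstartb,
    bfsA_eq_legB maps (lr, lc) (er, ec) hleverb, ← hrows, ← hcols]
  have hn1 := bfsLoopB_nonneg maps rows cols (lr, lc)
    (2 * falseCount (vset (initV rows cols) sr sc) + 1)
    (vset (initV rows cols) sr sc) [(sr, sc)] 0
    (by rw [if_neg (List.cons_ne_nil _ _)]) (by omega)
  have hn2 := bfsLoopB_nonneg maps rows cols (er, ec)
    (2 * falseCount (vset (initV rows cols) lr lc) + 1)
    (vset (initV rows cols) lr lc) [(lr, lc)] 0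
    (by rw [if_neg (List.cons_ne_nil _ _)]) (by omega)
  have he1 : legB maps rows cols (sr, sc) (lr, lc)
      = bfsLoopB maps rows cols (lr, lc) (vset (initV rows cols) sr sc) [(sr, sc)] 0 := by
    rw [← bfsA_eq_legB maps (sr, sc) (lr, lc) hstartb]
    unfold bfsA
    rw [bfs_gen, ← hrows, ← hcols]
  have he2 : legB maps rows cols (lr, lc) (er, ec)
      = bfsLoopB maps rows cols (er, ec) (vset (initV rows cols) lr lc) [(lr, lc)] 0 := by
    rw [← bfsA_eq_legB maps (lr, lc) (er, ec) hleverb]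
    unfold bfsA
    rw [bfs_gen, ← hrows, ← hcols]
  rw [← he1] at hn1
  rw [← he2] at hn2
  set d1 := legB maps rows cols (sr, sc) (lr, lc)
  set d2 := legB maps rows cols (lr, lc) (er, ec)
  simp only [ne_eq, decide_eq_true_eq, not_not]
  rcases hn1 with h1 | h1
  · rw [if_pos (Or.inl h1), if_pos (show d1 < 0 by omega)]
  · rcases hn2 with h2 | h2
    · rw [if_pos (Or.inr h2), if_neg (show ¬ d1 < 0 by omega), if_pos (show d2 < 0 by omega), h2]
    · rw [if_neg (by push Not; exact ⟨by omega, by omega⟩),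
        if_neg (show ¬ d1 < 0 by omega), if_neg (show ¬ d2 < 0 by omega)]

-- ===== VERDICT (by name: the statement is the Claim_ definition above) =====
theorem solution_spec : Claim_equal_solution := by
  unfold Claim_equal_solution Spec_solution
  intro maps _ hpre
  exact solution_eq maps hpre
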